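-- pv_equiv track=rewrite | github.com/wherby/code | algorithm/geometry/物品放置问题/q12/q12.backtrack.py | solve_region_fast
-- ===== SOURCE A (Python) =====
-- from functools import lru_cache
--
-- def solve_region_fast(width, height, counts, shape_placements):
--     """使用优化的回溯算法解决区域"""
--     total_cells = width * height
--
--     # 将形状列表展开
--     pieces = []
--     for shape_id, count in enumerate(counts):
--         if count > 0 and shape_id < len(shape_placements):
--             pieces.extend([shape_id] * count)
--
--     if not pieces:
--         return True
--
--     # 按大小排序（大的先放）
--     def piece_size(piece_id):
--         # 使用第一个放置的大小（所有放置大小相同）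
--         if shape_placements[piece_id]:
--             mask = shape_placements[piece_id][0]
--             return bin(mask).count('1')
--         return 0
--
--     pieces.sort(key=piece_size, reverse=True)
--
--     # 预计算每个形状的放置
--     placements_by_shape = shape_placements
--
--     @lru_cache(maxsize=None)
--     def backtrack(piece_idx, board_mask):
--         """回溯搜索"""
--         if piece_idx >= len(pieces):
--             return True
--
--         shape_id = pieces[piece_idx]
--
--         # 尝试所有可能的放置
--         for placement_mask in placements_by_shape[shape_id]:
--             # 检查是否与已放置的形状冲突
--             if board_mask & placement_mask:
--                 continue
--
--             # 放置形状
--             new_mask = board_mask | placement_mask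
--
--             # 递归
--             if backtrack(piece_idx + 1, new_mask):
--                 return True
--
--         return False
--
--     return backtrack(0, 0)
-- ===== SOURCE B (Python) =====
-- def solve_region_fast(width, height, counts, shape_placements):
--     """Breadth-first set-of-reachable-boards solver: instead of a recursive
--     depth-first backtrack, fold over the piece sequence keeping the set of
--     achievable board masks after each piece; feasible iff the set is nonempty."""
--     pieces = [sid for sid, c in enumerate(counts)
--               if sid < len(shape_placements) for _ in range(c)]
--     pieces.sort(key=lambda pid: bin(shape_placements[pid][0]).count('1')
--                 if shape_placements[pid] else 0, reverse=True)
--     frontier = {0}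
--     for pid in pieces:
--         pls = shape_placements[pid]
--         frontier = {b | m for b in frontier for m in pls if b & m == 0}
--     return bool(frontier)
-- ===== Notes on version B (the rewrite author's own statement) =====
-- stated objective: alternative
-- what changed: Replaced the memoised recursive depth-first backtracking with a breadth-first fold that maintains the set of reachable board masks after each placed piece and tests the final set for non-emptiness.
import Mathlib
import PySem

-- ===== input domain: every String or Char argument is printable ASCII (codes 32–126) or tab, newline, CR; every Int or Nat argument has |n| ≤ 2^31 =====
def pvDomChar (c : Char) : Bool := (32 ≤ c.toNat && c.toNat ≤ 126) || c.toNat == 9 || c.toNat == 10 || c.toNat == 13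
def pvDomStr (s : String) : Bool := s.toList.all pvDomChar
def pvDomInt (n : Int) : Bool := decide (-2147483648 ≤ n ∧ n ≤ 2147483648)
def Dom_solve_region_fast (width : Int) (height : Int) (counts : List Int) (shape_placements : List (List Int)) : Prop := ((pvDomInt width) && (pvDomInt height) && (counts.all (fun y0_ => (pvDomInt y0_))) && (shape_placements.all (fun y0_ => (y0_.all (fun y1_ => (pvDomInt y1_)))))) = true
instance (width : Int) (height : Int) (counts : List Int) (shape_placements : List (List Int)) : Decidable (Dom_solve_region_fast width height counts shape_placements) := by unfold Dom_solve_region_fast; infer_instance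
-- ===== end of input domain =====

-- B replaces A's memoised depth-first backtracking with a breadth-first fold that keeps the set of
-- reachable board masks after each placed piece (objective: alternative algorithm, same result).

-- ===== PORT A =====
-- list.sort(key=…, reverse=True) exactly as CPython runs it: compute the key once per element
-- (decorate), stable mergesort descending on the key (equal keys keep list order), undecorate.
def pySortByKeyRev (key : Int → Int) (xs : List Int) : List Int :=
  ((xs.map (fun x => (key x, x))).mergeSort (fun a b => b.1 ≤ a.1)).map (fun p => p.2)

-- piece_size: bin(shape_placements[piece_id][0]).count('1') if the placement list is nonempty, else 0.
-- (indices are always in range when A calls this, so pyGetD's defaults are never the result)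
def pvPieceSize (sp : List (List Int)) (pid : Int) : Int :=
  let pl := PySem.List.pyGetD sp pid []
  if pl ≠ [] then (PySem.Int.bitCount (PySem.List.pyGetD pl 0 0) : Int) else 0

-- backtrack(piece_idx, board_mask): structural recursion on the remaining pieces; the Python
-- `for placement_mask in …: if collision: continue; if backtrack(...): return True` / `return False`
-- loop is the short-circuit `List.any` over the same placement list.  A's lru_cache only memoises
-- and does not change the returned value, so it has no counterpart in the transliteration.
def pvBacktrack (sp : List (List Int)) : List Int → Int → Bool
  | [], _ => true
  | pid :: rest, board =>
      (PySem.List.pyGetD sp pid []).any (fun m =>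
        (PySem.Int.band board m == 0) && pvBacktrack sp rest (PySem.Int.bor board m))

def solve_region_fast (width : Int) (height : Int) (counts : List Int) (shape_placements : List (List Int)) : Bool :=
  -- pieces.extend([shape_id] * count) for counts with count > 0 and shape_id < len(shape_placements)
  let pieces := (PySem.List.enumerate counts).foldl
      (fun acc p => if p.2 > 0 && p.1 < (shape_placements.length : Int)
                    then acc ++ List.replicate p.2.toNat p.1 else acc) ([] : List Int)
  if pieces = [] then true
  else
    pvBacktrack shape_placements (pySortByKeyRev (pvPieceSize shape_placements) pieces) 0

-- ===== PORT B =====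
-- one BFS level: {b | m for b in frontier for m in shape_placements[pid] if b & m == 0}
def pvStepPiece (sp : List (List Int)) (S : PySem.Set Int) (pid : Int) : PySem.Set Int :=
  PySem.Set.ofList (S.flatMap (fun b =>
    ((PySem.List.pyGetD sp pid []).filter (fun m => PySem.Int.band b m == 0)).map
      (fun m => PySem.Int.bor b m)))

def solve_region_fast_alt (width : Int) (height : Int) (counts : List Int) (shape_placements : List (List Int)) : Bool :=
  -- [sid for sid, c in enumerate(counts) if sid < len(shape_placements) for _ in range(c)]
  let pieces := (PySem.List.enumerate counts).flatMap
      (fun p => if p.1 < (shape_placements.length : Int)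
                then (PySem.List.pyRange 0 p.2 1).map (fun _ => p.1) else [])
  let pieces := pySortByKeyRev
      (fun pid =>
        if PySem.List.pyGetD shape_placements pid [] ≠ [] then
          (PySem.Int.bitCount (PySem.List.pyGetD (PySem.List.pyGetD shape_placements pid []) 0 0) : Int)
        else 0) pieces
  let frontier := pieces.foldl (pvStepPiece shape_placements) (PySem.Set.ofList [0])
  !frontier.isEmpty

-- ===== PRECONDITION & SPEC =====
def Spec_solve_region_fast (width : Int) (height : Int) (counts : List Int) (shape_placements : List (List Int)) (out : Bool) : Prop := out = solve_region_fast_alt width height counts shape_placements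
instance (width : Int) (height : Int) (counts : List Int) (shape_placements : List (List Int)) (out : Bool) : Decidable (Spec_solve_region_fast width height counts shape_placements out) := by unfold Spec_solve_region_fast; infer_instance

-- ===== CLAIM (what is proved, stated in full; the proofs are below) =====
def Claim_equal_solve_region_fast : Prop := ∀ (width : Int) (height : Int) (counts : List Int) (shape_placements : List (List Int)), Dom_solve_region_fast width height counts shape_placements → Spec_solve_region_fast width height counts shape_placements (solve_region_fast width height counts shape_placements)

-- ===== LEMMAS AND PROOFS =====

-- A's foldl-extend expansion builds the same piece list as B's comprehension.
theorem pvExpand_eq (n : Int) (L : List (Int × Int)) (acc : List Int) :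
    L.foldl (fun acc p => if p.2 > 0 && p.1 < n
                          then acc ++ List.replicate p.2.toNat p.1 else acc) acc
      = acc ++ L.flatMap (fun p => if p.1 < n
                          then (PySem.List.pyRange 0 p.2 1).map (fun _ => p.1) else []) := by
  induction L generalizing acc with
  | nil => simp
  | cons q L ih =>
      simp only [List.foldl_cons, List.flatMap_cons, ih]
      by_cases hc : q.2 > 0
      · by_cases hn : q.1 < n
        · have : (PySem.List.pyRange 0 q.2 1).map (fun _ => q.1)
              = List.replicate q.2.toNat q.1 := by
            rw [List.map_const', PySem.List.length_pyRange_one]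
            simp
          simp [hc, hn, this, List.append_assoc]
        · simp [hc, hn]
      · have hr : PySem.List.pyRange 0 q.2 1 = [] :=
          PySem.List.pyRange_one_eq_nil (by omega)
        simp [hc, hr]

-- BFS bridge: some board in S admits placing all remaining pieces (the DFS answer) iff the
-- frontier obtained by folding the BFS step over those pieces is nonempty.
theorem pvBFS_bridge (sp : List (List Int)) (ps : List Int) :
    ∀ S : List Int, S.any (fun b => pvBacktrack sp ps b)
      = !(ps.foldl (pvStepPiece sp) S).isEmpty := by
  induction ps with
  | nil => intro S; cases S <;> simp [pvBacktrack]
  | cons pid rest ih =>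
      intro S
      rw [List.foldl_cons, ← ih]
      rw [Bool.eq_iff_iff]
      simp only [List.any_eq_true, pvBacktrack, pvStepPiece, Bool.and_eq_true,
        PySem.Set.mem_ofList, List.mem_flatMap, List.mem_map, List.mem_filter]
      constructor
      · rintro ⟨b, hb, m, hm, hok, hbt⟩
        exact ⟨PySem.Int.bor b m, ⟨b, hb, m, ⟨hm, hok⟩, rfl⟩, hbt⟩
      · rintro ⟨x, ⟨b, hb, m, ⟨hm, hok⟩, rfl⟩, hbt⟩
        exact ⟨b, hb, m, hm, hok, hbt⟩

-- ===== VERDICT (by name: the statement is the Claim_ definition above) =====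
theorem solve_region_fast_spec : Claim_equal_solve_region_fast := by
  intro width height counts sp _
  unfold Spec_solve_region_fast solve_region_fast solve_region_fast_alt
  rw [pvExpand_eq]
  simp only [List.nil_append]
  set ps := (PySem.List.enumerate counts).flatMap
      (fun p => if p.1 < (sp.length : Int)
                then (PySem.List.pyRange 0 p.2 1).map (fun _ => p.1) else []) with hps
  have hkey : (fun pid =>
        if PySem.List.pyGetD sp pid [] ≠ [] then
          (PySem.Int.bitCount (PySem.List.pyGetD (PySem.List.pyGetD sp pid []) 0 0) : Int)
        else 0) = pvPieceSize sp := by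
    funext pid; simp [pvPieceSize]
  rw [hkey]
  by_cases h : ps = []
  · rw [h]
    simp [pySortByKeyRev]
    decide
  · simp only [h, if_neg h]
    have h0 : PySem.Set.ofList ([0] : List Int) = [0] := rfl
    have := pvBFS_bridge sp (pySortByKeyRev (pvPieceSize sp) ps) (PySem.Set.ofList [0])
    rw [h0] at this
    simpa using this
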